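-- pv_equiv track=rewrite | github.com/jyztintan/leetcode | Python/map_of_highest_peak.py | highestPeak
-- ===== SOURCE A (Python) =====
-- from typing import List
--
-- def highestPeak(isWater: List[List[int]]) -> List[List[int]]:
--     m, n = len(isWater), len(isWater[0])
--
--     cells = [[0] * n for _ in range(m)]
--
--     visited = set()
--     curr = set()
--
--     for row in range(m):
--         for col in range(n):
--             if isWater[row][col] == 1:
--                 curr.add((row, col))
--                 visited.add((row, col))
--
--     height = 0
--     directions = [[0, 1], [0, -1], [1, 0], [-1, 0]]
--     while curr:
--         next_curr = set()
--         for row, col in curr: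
--             cells[row][col] = height
--
--             for x, y in directions:
--                 new_row, new_col = row + x, col + y
--                 if (new_row, new_col) not in visited and 0 <= new_row < m and 0 <= new_col < n:
--                     visited.add((new_row, new_col))
--                     next_curr.add((new_row, new_col))
--
--         curr = next_curr
--         height += 1
--
--     return cells
-- ===== SOURCE B (Python) =====
-- def highestPeak(isWater):
--     m, n = len(isWater), len(isWater[0])
--     waters = [(r, c) for r in range(m) for c in range(n) if isWater[r][c] == 1]
--     return [[min((abs(r - wr) + abs(c - wc) for wr, wc in waters), default=0)
--              for c in range(n)] for r in range(m)]
-- ===== Notes on version B (the rewrite author's own statement) =====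
-- stated objective: simpler
-- what changed: A's multi-source BFS (frontier sets, visited set, level counter, neighbour expansion) is replaced by a closed-form computation with no search at all: collect the water cells once, then each cell's height is the minimum Manhattan distance to a water cell (with default 0 when there is no water), which equals the BFS distance because the grid has no obstacles.
import Mathlib
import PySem

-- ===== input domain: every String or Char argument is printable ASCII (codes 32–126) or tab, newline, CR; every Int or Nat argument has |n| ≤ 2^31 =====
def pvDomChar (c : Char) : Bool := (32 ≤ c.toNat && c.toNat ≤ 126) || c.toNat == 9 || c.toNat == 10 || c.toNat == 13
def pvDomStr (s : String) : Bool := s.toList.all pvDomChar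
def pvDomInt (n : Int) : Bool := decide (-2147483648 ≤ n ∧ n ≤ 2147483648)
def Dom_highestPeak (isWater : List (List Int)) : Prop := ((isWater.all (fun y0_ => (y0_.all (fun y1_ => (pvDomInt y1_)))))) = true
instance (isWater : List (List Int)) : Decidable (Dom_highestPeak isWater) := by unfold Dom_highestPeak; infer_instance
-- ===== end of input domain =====

-- B replaces A's multi-source BFS by a closed form: each cell's height is the minimum
-- Manhattan distance to a water cell (equal to the BFS distance, the grid having no
-- obstacles); objective: a simpler, search-free implementation (not faster).

-- ===== PORT A =====
-- shared grid primitives: cells[r][c] read / write; every use is guarded 0 ≤ r < m, 0 ≤ c < n,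
-- where pyGetD/pySetD are exact (Python never reaches a negative or out-of-range index here)
def pvGet2 (g : List (List Int)) (r c : Int) : Int :=
  PySem.List.pyGetD (PySem.List.pyGetD g r []) c 0

def pvSet2 (g : List (List Int)) (r c v : Int) : List (List Int) :=
  PySem.List.pySetD g r (PySem.List.pySetD (PySem.List.pyGetD g r []) c v)

def pvDirections : List (Int × Int) := [(0, 1), (0, -1), (1, 0), (-1, 0)]

-- A's inner `for x, y in directions:` body (visited / next_curr threaded)
def pvInnerA (m n r c : Int)
    (st : List (List Int) × PySem.Set (Int × Int) × PySem.Set (Int × Int)) (d : Int × Int) :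
    List (List Int) × PySem.Set (Int × Int) × PySem.Set (Int × Int) :=
  let p := (r + d.1, c + d.2)
  if ¬ (PySem.Set.contains st.2.1 p) = true ∧ 0 ≤ p.1 ∧ p.1 < m ∧ 0 ≤ p.2 ∧ p.2 < n then
    (st.1, PySem.Set.add st.2.1 p, PySem.Set.add st.2.2 p)
  else st

-- A's body of `for row, col in curr:` — write height, then scan the four directions
def pvStepA (m n height : Int)
    (st : List (List Int) × PySem.Set (Int × Int) × PySem.Set (Int × Int)) (cell : Int × Int) :
    List (List Int) × PySem.Set (Int × Int) × PySem.Set (Int × Int) :=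
  let cells := pvSet2 st.1 cell.1 cell.2 height
  pvDirections.foldl (pvInnerA m n cell.1 cell.2) (cells, st.2.1, st.2.2)

-- A's initial double loop filling `curr` and `visited`
def pvInitA (isWater : List (List Int)) (m n : Int) :
    PySem.Set (Int × Int) × PySem.Set (Int × Int) :=
  (PySem.List.pyRange 0 m 1).foldl (fun cv r =>
    (PySem.List.pyRange 0 n 1).foldl (fun cv c =>
      if pvGet2 isWater r c == 1 then (PySem.Set.add cv.1 (r, c), PySem.Set.add cv.2 (r, c))
      else cv) cv)
    (PySem.Set.empty, PySem.Set.empty)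

def pvGridCells (m n : Int) : List (Int × Int) :=
  (PySem.List.pyRange 0 m 1).flatMap (fun r => (PySem.List.pyRange 0 n 1).map (fun c => (r, c)))

-- A's `while curr:` loop; the fuel argument only makes the recursion structural — the
-- caller passes more fuel than the loop can consume (every iteration visits a new cell),
-- so the 0 case is never reached (established inside the proof of pvLoopA_minM)
def pvLoopA (fuel : Nat) (m n : Int) (cells : List (List Int))
    (visited curr : PySem.Set (Int × Int)) (height : Int) : List (List Int) :=
  match fuel with
  | 0 => cells
  | Nat.succ fuel =>
    if curr = [] then cells
    else
      let st := curr.foldl (pvStepA m n height) (cells, visited, PySem.Set.empty)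
      pvLoopA fuel m n st.1 st.2.1 st.2.2 (height + 1)

def highestPeak (isWater : List (List Int)) : List (List Int) :=
  let m : Int := isWater.length
  let n : Int := (isWater.headD []).length
  let cells := (PySem.List.pyRange 0 m 1).map (fun _ => List.replicate n.toNat 0)
  let cv := pvInitA isWater m n
  pvLoopA ((pvGridCells m n).length * 2 + 1) m n cells cv.2 cv.1 0

-- ===== PORT B =====
-- B's comprehension `[(r, c) for r in range(m) for c in range(n) if isWater[r][c] == 1]`
def pvWaters (isWater : List (List Int)) (m n : Int) : List (Int × Int) :=
  (PySem.List.pyRange 0 m 1).foldl (fun acc r =>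
    (PySem.List.pyRange 0 n 1).foldl (fun acc c =>
      if pvGet2 isWater r c == 1 then acc ++ [(r, c)] else acc) acc) []

-- B's `min((abs(r-wr)+abs(c-wc) for wr, wc in waters), default=0)` per grid cell
def highestPeak_alt (isWater : List (List Int)) : List (List Int) :=
  let m : Int := isWater.length
  let n : Int := (isWater.headD []).length
  let waters := pvWaters isWater m n
  (PySem.List.pyRange 0 m 1).map (fun r =>
    (PySem.List.pyRange 0 n 1).map (fun c =>
      PySem.List.minD (waters.map (fun w => |r - w.1| + |c - w.2|)) (fun x => x) 0))

-- ===== PRECONDITION & SPEC =====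
-- Pre_ excludes exactly the inputs where Python A raises: the empty grid (isWater[0] is an
-- IndexError) and grids with a row shorter than row 0 (isWater[row][col] raises).
def Pre_highestPeak (isWater : List (List Int)) : Prop :=
  isWater ≠ [] ∧ ∀ row ∈ isWater, (isWater.headD []).length ≤ row.length
instance (isWater : List (List Int)) : Decidable (Pre_highestPeak isWater) := by
  unfold Pre_highestPeak; infer_instance

def pvWitness_highestPeak : List (List Int) := [[1, 0, 2], [0, 0, 1]]

def Spec_highestPeak (isWater : List (List Int)) (out : List (List Int)) : Prop :=
  out = highestPeak_alt isWater
instance (isWater : List (List Int)) (out : List (List Int)) :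
    Decidable (Spec_highestPeak isWater out) := by unfold Spec_highestPeak; infer_instance

-- ===== CLAIM (what is proved, stated in full; the proofs are below) =====
def Claim_equal_highestPeak : Prop := ∀ (isWater : List (List Int)), Dom_highestPeak isWater →
  Pre_highestPeak isWater → Spec_highestPeak isWater (highestPeak isWater)

-- ===== LEMMAS AND PROOFS =====

-- ---- frontier/visited bookkeeping used by the equivalence proof ----
def pvFree (m n : Int) (vis : List (Int × Int)) : Nat :=
  ((pvGridCells m n).filter (fun p => !(vis.contains p))).length

-- reference fold: the new in-bounds unvisited neighbours, appended to both components
def pvNbrStep (m n r c : Int) (st : List (Int × Int) × List (Int × Int)) (d : Int × Int) :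
    List (Int × Int) × List (Int × Int) :=
  let p := (r + d.1, c + d.2)
  if ¬ (PySem.Set.contains st.1 p) = true ∧ 0 ≤ p.1 ∧ p.1 < m ∧ 0 ≤ p.2 ∧ p.2 < n then
    (st.1 ++ [p], st.2 ++ [p])
  else st

theorem pvNbrFold_char (m n r c : Int) (ds : List (Int × Int)) :
    ∀ (vis acc : List (Int × Int)),
      ds.foldl (pvNbrStep m n r c) (vis, acc)
        = (vis ++ (ds.foldl (pvNbrStep m n r c) (vis, [])).2,
           acc ++ (ds.foldl (pvNbrStep m n r c) (vis, [])).2) := by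
  induction ds with
  | nil => intro vis acc; simp
  | cons d ds ih =>
    intro vis acc
    simp only [List.foldl_cons, pvNbrStep]
    by_cases hC : ¬ (PySem.Set.contains vis (r + d.1, c + d.2)) = true ∧
        0 ≤ r + d.1 ∧ r + d.1 < m ∧ 0 ≤ c + d.2 ∧ c + d.2 < n
    · simp only [if_pos hC, List.nil_append]
      rw [ih (vis ++ [(r + d.1, c + d.2)]) (acc ++ [(r + d.1, c + d.2)]),
          ih (vis ++ [(r + d.1, c + d.2)]) [(r + d.1, c + d.2)]]
      simp
    · simp only [if_neg hC]
      exact ih vis acc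

theorem pvNbrFold_props (m n r c : Int) (ds : List (Int × Int)) :
    ∀ (vis : List (Int × Int)),
      ((ds.foldl (pvNbrStep m n r c) (vis, [])).2).Nodup ∧
      ∀ p ∈ (ds.foldl (pvNbrStep m n r c) (vis, [])).2,
        p ∉ vis ∧ 0 ≤ p.1 ∧ p.1 < m ∧ 0 ≤ p.2 ∧ p.2 < n := by
  induction ds with
  | nil => intro vis; simp
  | cons d ds ih =>
    intro vis
    simp only [List.foldl_cons, pvNbrStep]
    by_cases hC : ¬ (PySem.Set.contains vis (r + d.1, c + d.2)) = true ∧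
        0 ≤ r + d.1 ∧ r + d.1 < m ∧ 0 ≤ c + d.2 ∧ c + d.2 < n
    · simp only [if_pos hC, List.nil_append]
      rw [pvNbrFold_char m n r c ds (vis ++ [(r + d.1, c + d.2)]) [(r + d.1, c + d.2)]]
      obtain ⟨hnd, hmem⟩ := ih (vis ++ [(r + d.1, c + d.2)])
      have hp : (r + d.1, c + d.2) ∉ vis := by
        have := hC.1; simpa [PySem.Set.contains] using this
      constructor
      · simp only [List.cons_append, List.nil_append, List.nodup_cons]
        refine ⟨?_, hnd⟩
        intro hmem'
        exact (hmem _ hmem').1 (by simp)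
      · intro q hq
        simp only [List.cons_append, List.nil_append, List.mem_cons] at hq
        rcases hq with rfl | hq
        · exact ⟨hp, hC.2⟩
        · have := hmem q hq
          refine ⟨fun hqv => this.1 (by simp [hqv]), this.2⟩
    · simp only [if_neg hC]
      exact ih vis

theorem pvMem_gridCells (m n : Int) (p : Int × Int) :
    p ∈ pvGridCells m n ↔ 0 ≤ p.1 ∧ p.1 < m ∧ 0 ≤ p.2 ∧ p.2 < n := by
  obtain ⟨a, b⟩ := p
  simp only [pvGridCells, List.mem_flatMap, List.mem_map, PySem.List.mem_pyRange_one]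
  constructor
  · rintro ⟨r, hr, c, hc, h⟩
    cases h
    exact ⟨hr.1, hr.2, hc.1, hc.2⟩
  · rintro ⟨h1, h2, h3, h4⟩
    exact ⟨a, ⟨h1, h2⟩, b, ⟨h3, h4⟩, rfl⟩

theorem pvNodup_gridCells (m n : Int) : (pvGridCells m n).Nodup := by
  rw [pvGridCells, List.nodup_flatMap]
  constructor
  · intro r _
    exact (PySem.List.nodup_pyRange_one 0 n).map (fun c c' h => by simpa using congrArg Prod.snd h)
  · refine List.Pairwise.imp ?_ (PySem.List.nodup_pyRange_one 0 m)
    intro r r' hne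
    intro x hx hx'
    simp only [List.mem_map] at hx hx'
    obtain ⟨c, _, rfl⟩ := hx
    obtain ⟨c', _, h⟩ := hx'
    exact hne (congrArg Prod.fst h.symm)

theorem pvFilter_snoc {vis : List (Int × Int)} (p : Int × Int) :
    ∀ (l : List (Int × Int)), l.Nodup → p ∈ l → p ∉ vis →
      (l.filter (fun x => !((vis ++ [p]).contains x))).length + 1
        = (l.filter (fun x => !(vis.contains x))).length := by
  intro l
  induction l with
  | nil => intro _ h; cases h
  | cons a l ih =>
    intro hnd hmem hpv
    simp only [List.nodup_cons] at hnd
    rcases List.mem_cons.mp hmem with rfl | hmem'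
    · have h2 : ∀ x ∈ l, ((vis ++ [p]).contains x) = (vis.contains x) := by
        intro x hx
        have : x ≠ p := fun h => hnd.1 (h ▸ hx)
        simp [List.contains_eq_mem, this]
      rw [List.filter_cons, List.filter_cons,
          List.filter_congr (fun x hx => by rw [h2 x hx])]
      have hA : ((vis ++ [p]).contains p) = true := by simp [List.contains_eq_mem]
      have hB : ((vis).contains p) = false := by simp [List.contains_eq_mem, hpv]
      simp [hpv]
    · have hap : a ≠ p := fun h => hnd.1 (h ▸ hmem')
      rw [List.filter_cons, List.filter_cons]
      have hih := ih hnd.2 hmem' hpv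
      by_cases hav : a ∈ vis
      · have h1 : ((vis ++ [p]).contains a) = true := by simp [List.contains_eq_mem, hav]
        have h2 : ((vis).contains a) = true := by simp [List.contains_eq_mem, hav]
        rw [h1, h2]
        simpa using hih
      · have h1 : ((vis ++ [p]).contains a) = false := by
          simp [List.contains_eq_mem, hav, hap]
        have h2 : ((vis).contains a) = false := by simp [List.contains_eq_mem, hav]
        rw [h1, h2]
        simp only [Bool.not_false, if_pos, List.length_cons]
        omega

theorem pvFree_append (m n : Int) (N : List (Int × Int)) :
    ∀ (vis : List (Int × Int)), N.Nodup →
      (∀ p ∈ N, p ∉ vis ∧ 0 ≤ p.1 ∧ p.1 < m ∧ 0 ≤ p.2 ∧ p.2 < n) →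
      pvFree m n (vis ++ N) + N.length = pvFree m n vis := by
  induction N with
  | nil => intro vis _ _; simp
  | cons p N ih =>
    intro vis hnd hmem
    simp only [List.nodup_cons] at hnd
    have hp := hmem p (by simp)
    have hstep : pvFree m n (vis ++ [p]) + 1 = pvFree m n vis := by
      unfold pvFree
      exact pvFilter_snoc p (pvGridCells m n) (pvNodup_gridCells m n)
        ((pvMem_gridCells m n p).mpr hp.2) hp.1
    have hrest := ih (vis ++ [p]) hnd.2 (by
      intro q hq
      have := hmem q (by simp [hq])
      refine ⟨?_, this.2⟩
      intro hqv
      rcases List.mem_append.mp hqv with h | h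
      · exact this.1 h
      · exact hnd.1 ((List.mem_singleton.mp h) ▸ hq))
    have : vis ++ p :: N = (vis ++ [p]) ++ N := by simp
    rw [this]
    simp only [List.length_cons]
    omega

theorem pvFoldA_char (m n r c : Int) (ds : List (Int × Int)) :
    ∀ (cells : List (List Int)) (vis nxt : List (Int × Int)),
      (∀ x ∈ nxt, x ∈ vis) →
      ds.foldl (pvInnerA m n r c) (cells, vis, nxt)
        = (cells, vis ++ (ds.foldl (pvNbrStep m n r c) (vis, [])).2,
           nxt ++ (ds.foldl (pvNbrStep m n r c) (vis, [])).2) := by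
  induction ds with
  | nil => intro cells vis nxt _; simp
  | cons d ds ih =>
    intro cells vis nxt hsub
    simp only [List.foldl_cons, pvInnerA, pvNbrStep]
    by_cases hC : ¬ (PySem.Set.contains vis (r + d.1, c + d.2)) = true ∧
        0 ≤ r + d.1 ∧ r + d.1 < m ∧ 0 ≤ c + d.2 ∧ c + d.2 < n
    · simp only [if_pos hC, List.nil_append]
      have hpv : (r + d.1, c + d.2) ∉ vis := by
        have := hC.1; simpa [PySem.Set.contains] using this
      have hpn : (r + d.1, c + d.2) ∉ nxt := fun h => hpv (hsub _ h)
      have haddv : PySem.Set.add vis (r + d.1, c + d.2) = vis ++ [(r + d.1, c + d.2)] := by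
        simp [PySem.Set.add, PySem.Set.contains, hpv]
      have haddn : PySem.Set.add nxt (r + d.1, c + d.2) = nxt ++ [(r + d.1, c + d.2)] := by
        simp [PySem.Set.add, PySem.Set.contains, hpn]
      rw [haddv, haddn]
      rw [ih cells (vis ++ [(r + d.1, c + d.2)]) (nxt ++ [(r + d.1, c + d.2)]) (by
        intro x hx
        rcases List.mem_append.mp hx with h | h
        · exact List.mem_append.mpr (Or.inl (hsub _ h))
        · exact List.mem_append.mpr (Or.inr h)),
        pvNbrFold_char m n r c ds (vis ++ [(r + d.1, c + d.2)]) [(r + d.1, c + d.2)]]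
      simp
    · simp only [if_neg hC]
      exact ih cells vis nxt hsub

theorem pvLevelA_char (m n h : Int) (curr : List (Int × Int)) :
    ∀ (cells : List (List Int)) (vis nxt : List (Int × Int)),
      (∀ x ∈ nxt, x ∈ vis) →
      ∃ C M, curr.foldl (pvStepA m n h) (cells, vis, nxt) = (C, vis ++ M, nxt ++ M) ∧
        M.Nodup ∧ ∀ p ∈ M, p ∉ vis ∧ 0 ≤ p.1 ∧ p.1 < m ∧ 0 ≤ p.2 ∧ p.2 < n := by
  induction curr with
  | nil =>
    intro cells vis nxt _
    exact ⟨cells, [], by simp, by simp, by simp⟩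
  | cons cell curr ih =>
    intro cells vis nxt hsub
    simp only [List.foldl_cons]
    have hstep : pvStepA m n h (cells, vis, nxt) cell
        = (pvSet2 cells cell.1 cell.2 h,
           vis ++ (pvDirections.foldl (pvNbrStep m n cell.1 cell.2) (vis, [])).2,
           nxt ++ (pvDirections.foldl (pvNbrStep m n cell.1 cell.2) (vis, [])).2) := by
      rw [pvStepA, pvFoldA_char m n cell.1 cell.2 pvDirections _ vis nxt hsub]
    rw [hstep]
    obtain ⟨hndN, hmemN⟩ := pvNbrFold_props m n cell.1 cell.2 pvDirections vis
    obtain ⟨C, M, heq, hndM, hmemM⟩ :=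
      ih (pvSet2 cells cell.1 cell.2 h)
        (vis ++ (pvDirections.foldl (pvNbrStep m n cell.1 cell.2) (vis, [])).2)
        (nxt ++ (pvDirections.foldl (pvNbrStep m n cell.1 cell.2) (vis, [])).2) (by
          intro x hx
          rcases List.mem_append.mp hx with h' | h'
          · exact List.mem_append.mpr (Or.inl (hsub _ h'))
          · exact List.mem_append.mpr (Or.inr h'))
    refine ⟨C, (pvDirections.foldl (pvNbrStep m n cell.1 cell.2) (vis, [])).2 ++ M,
      by rw [heq]; simp, ?_, ?_⟩
    · refine List.Nodup.append hndN hndM ?_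
      intro x hx hx'
      exact (hmemM x hx').1 (List.mem_append.mpr (Or.inr hx))
    · intro p hp
      rcases List.mem_append.mp hp with h' | h'
      · exact hmemN p h'
      · have := hmemM p h'
        exact ⟨fun hv => this.1 (List.mem_append.mpr (Or.inl hv)), this.2⟩


-- the value B computes at cell (r, c), given the water list W
def pvMinM (W : List (Int × Int)) (r c : Int) : Int :=
  PySem.List.minD (W.map (fun w => |r - w.1| + |c - w.2|)) (fun x => x) 0

-- a grid presented as a function of its coordinates
def pvGridOf (m n : Int) (f : Int → Int → Int) : List (List Int) :=
  (PySem.List.pyRange 0 m 1).map (fun r => (PySem.List.pyRange 0 n 1).map (f r))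

-- 4-adjacency, exactly as A's direction scan generates it
def pvAdj (p q : Int × Int) : Prop := ∃ d ∈ pvDirections, q = (p.1 + d.1, p.2 + d.2)

theorem pvMinM_cons (w : Int × Int) (ws : List (Int × Int)) (r c : Int) :
    pvMinM (w :: ws) r c
      = (ws.map (fun w => |r - w.1| + |c - w.2|)).foldl min (|r - w.1| + |c - w.2|) := by
  simp [pvMinM, PySem.List.minD, PySem.List.min?_id_cons]

theorem pvMinM_le (W : List (Int × Int)) (r c : Int) {w : Int × Int} (hw : w ∈ W) :
    pvMinM W r c ≤ |r - w.1| + |c - w.2| := by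
  cases W with
  | nil => cases hw
  | cons w0 ws =>
    rw [pvMinM_cons]
    have hle := PySem.List.foldl_min_le (ws.map (fun w => |r - w.1| + |c - w.2|))
      (|r - w0.1| + |c - w0.2|)
    rcases List.mem_cons.mp hw with rfl | hw'
    · exact hle.1
    · exact hle.2 _ (List.mem_map_of_mem hw')

theorem pvMinM_att (W : List (Int × Int)) (hW : W ≠ []) (r c : Int) :
    ∃ w ∈ W, pvMinM W r c = |r - w.1| + |c - w.2| := by
  cases W with
  | nil => exact absurd rfl hW
  | cons w0 ws =>
    rw [pvMinM_cons]
    rcases PySem.List.foldl_min_mem (ws.map (fun w => |r - w.1| + |c - w.2|))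
      (|r - w0.1| + |c - w0.2|) with h | h
    · exact ⟨w0, by simp, h⟩
    · obtain ⟨w, hw, hv⟩ := List.mem_map.mp h
      exact ⟨w, by simp [hw], hv.symm⟩

theorem pvMinM_nonneg (W : List (Int × Int)) (hW : W ≠ []) (r c : Int) :
    0 ≤ pvMinM W r c := by
  obtain ⟨w, _, he⟩ := pvMinM_att W hW r c
  rw [he]
  positivity

theorem pvMinM_zero_iff (W : List (Int × Int)) (hW : W ≠ []) (r c : Int) :
    pvMinM W r c = 0 ↔ (r, c) ∈ W := by
  constructor
  · intro h0
    obtain ⟨w, hwW, he⟩ := pvMinM_att W hW r c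
    have : (r, c) = w := by
      obtain ⟨w1, w2⟩ := w
      rw [h0] at he
      simp only [Int.abs_eq_natAbs] at he
      have h1 : r = w1 := by omega
      have h2 : c = w2 := by omega
      simp [h1, h2]
    rwa [this]
  · intro hw
    have hle := pvMinM_le W r c hw
    have hge := pvMinM_nonneg W hW r c
    simp only [sub_self, abs_zero, add_zero] at hle
    omega

theorem pvAdj_symm {p q : Int × Int} (h : pvAdj p q) : pvAdj q p := by
  obtain ⟨d, hd, rfl⟩ := h
  refine ⟨(-d.1, -d.2), ?_, by simp⟩
  simp only [pvDirections, List.mem_cons, List.not_mem_nil, or_false] at hd ⊢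
  rcases hd with rfl | rfl | rfl | rfl <;> simp

theorem pvMinM_lip (W : List (Int × Int)) (hW : W ≠ []) {p q : Int × Int} (h : pvAdj p q) :
    pvMinM W q.1 q.2 ≤ pvMinM W p.1 p.2 + 1 := by
  obtain ⟨w, hwW, he⟩ := pvMinM_att W hW p.1 p.2
  obtain ⟨d, hd, rfl⟩ := h
  have hle := pvMinM_le W (p.1 + d.1) (p.2 + d.2) hwW
  simp only at hle
  rw [he]
  simp only [pvDirections, List.mem_cons, List.not_mem_nil, or_false] at hd
  rcases hd with rfl | rfl | rfl | rfl <;>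
    · simp only [Int.abs_eq_natAbs] at hle ⊢
      omega

theorem pvMinM_descent (m n : Int) (W : List (Int × Int)) (hW : W ≠ [])
    (hWg : ∀ w ∈ W, 0 ≤ w.1 ∧ w.1 < m ∧ 0 ≤ w.2 ∧ w.2 < n)
    (p : Int × Int) (hp : 0 ≤ p.1 ∧ p.1 < m ∧ 0 ≤ p.2 ∧ p.2 < n)
    (h1 : 1 ≤ pvMinM W p.1 p.2) :
    ∃ q, pvAdj p q ∧ (0 ≤ q.1 ∧ q.1 < m ∧ 0 ≤ q.2 ∧ q.2 < n) ∧
      pvMinM W q.1 q.2 = pvMinM W p.1 p.2 - 1 := by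
  obtain ⟨w, hwW, he⟩ := pvMinM_att W hW p.1 p.2
  obtain ⟨hw1, hw2, hw3, hw4⟩ := hWg w hwW
  -- pick one step toward w along a coordinate where p and w differ
  have hstep : ∃ d ∈ pvDirections,
      |p.1 + d.1 - w.1| + |p.2 + d.2 - w.2| = (|p.1 - w.1| + |p.2 - w.2|) - 1 ∧
      0 ≤ p.1 + d.1 ∧ p.1 + d.1 < m ∧ 0 ≤ p.2 + d.2 ∧ p.2 + d.2 < n := by
    rcases lt_trichotomy p.1 w.1 with hlt | heq | hgt
    · refine ⟨(1, 0), by simp [pvDirections], ?_⟩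
      simp only [Int.abs_eq_natAbs]
      omega
    · rcases lt_trichotomy p.2 w.2 with hlt2 | heq2 | hgt2
      · refine ⟨(0, 1), by simp [pvDirections], ?_⟩
        simp only [Int.abs_eq_natAbs]
        omega
      · exfalso
        rw [he] at h1
        simp only [Int.abs_eq_natAbs] at h1
        omega
      · refine ⟨(0, -1), by simp [pvDirections], ?_⟩
        simp only [Int.abs_eq_natAbs]
        omega
    · refine ⟨(-1, 0), by simp [pvDirections], ?_⟩
      simp only [Int.abs_eq_natAbs]
      omega
  obtain ⟨d, hd, hdist, hb⟩ := hstep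
  refine ⟨(p.1 + d.1, p.2 + d.2), ⟨d, hd, rfl⟩, hb, ?_⟩
  have hub : pvMinM W (p.1 + d.1) (p.2 + d.2) ≤ pvMinM W p.1 p.2 - 1 := by
    have := pvMinM_le W (p.1 + d.1) (p.2 + d.2) hwW
    simp only at this
    rw [he]
    omega
  have hlb : pvMinM W p.1 p.2 ≤ pvMinM W (p.1 + d.1) (p.2 + d.2) + 1 := by
    have := pvMinM_lip W hW (p := (p.1 + d.1, p.2 + d.2)) (q := p) (pvAdj_symm ⟨d, hd, rfl⟩)
    simpa using this
  show pvMinM W (p.1 + d.1) (p.2 + d.2) = pvMinM W p.1 p.2 - 1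
  omega

theorem pvChain (m n : Int) (W : List (Int × Int)) (hW : W ≠ [])
    (hWg : ∀ w ∈ W, 0 ≤ w.1 ∧ w.1 < m ∧ 0 ≤ w.2 ∧ w.2 < n) (h : Int) (h0 : 0 ≤ h) :
    ∀ (j : Nat) (p : Int × Int), (0 ≤ p.1 ∧ p.1 < m ∧ 0 ≤ p.2 ∧ p.2 < n) →
      pvMinM W p.1 p.2 = h + j →
      ∃ q : Int × Int, (0 ≤ q.1 ∧ q.1 < m ∧ 0 ≤ q.2 ∧ q.2 < n) ∧ pvMinM W q.1 q.2 = h := by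
  intro j
  induction j with
  | zero => intro p hp he; exact ⟨p, hp, by simpa using he⟩
  | succ j ih =>
    intro p hp he
    obtain ⟨q, hadj, hqb, hqv⟩ := pvMinM_descent m n W hW hWg p hp (by omega)
    exact ih q hqb (by rw [hqv, he]; push_cast; ring)

theorem pvGridOf_congr (m n : Int) (f g : Int → Int → Int)
    (h : ∀ r c, 0 ≤ r → r < m → 0 ≤ c → c < n → f r c = g r c) :
    pvGridOf m n f = pvGridOf m n g := by
  unfold pvGridOf
  refine List.map_congr_left ?_
  intro r hr
  rw [PySem.List.mem_pyRange_one] at hr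
  refine List.map_congr_left ?_
  intro c hc
  rw [PySem.List.mem_pyRange_one] at hc
  exact h r c hr.1 hr.2 hc.1 hc.2

theorem pvRowOf_set (n : Int) (f : Int → Int) (c v : Int) (hc : 0 ≤ c) (hcn : c < n) :
    ((PySem.List.pyRange 0 n 1).map f).set c.toNat v
      = (PySem.List.pyRange 0 n 1).map (fun c' => if c' = c then v else f c') := by
  refine List.ext_getElem (by simp) ?_
  intro j hj hj2
  rw [List.getElem_set]
  simp only [List.getElem_map, PySem.List.getElem_pyRange_one, zero_add]
  by_cases hjc : c.toNat = j
  · rw [if_pos hjc, if_pos (by omega)]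
  · rw [if_neg hjc, if_neg (by omega)]

theorem pvSet2_gridOf (m n : Int) (f : Int → Int → Int) (r c v : Int)
    (hr : 0 ≤ r) (hr' : r < m) (hc : 0 ≤ c) (hc' : c < n) :
    pvSet2 (pvGridOf m n f) r c v
      = pvGridOf m n (fun r' c' => if r' = r ∧ c' = c then v else f r' c') := by
  unfold pvSet2 pvGridOf
  rw [PySem.List.pyGetD_map_pyRange_of_nonneg _ m r [] hr hr',
      PySem.List.pySetD_of_nonneg _ _ hc,
      PySem.List.pySetD_of_nonneg _ _ hr]
  refine List.ext_getElem (by simp) ?_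
  intro i hi hi2
  rw [List.getElem_set]
  simp only [List.getElem_map, PySem.List.getElem_pyRange_one, zero_add]
  by_cases hir : r.toNat = i
  · rw [if_pos hir]
    rw [pvRowOf_set n (f r) c v hc hc']
    subst hir
    refine List.map_congr_left ?_
    intro c' hc'2
    have : (r.toNat : Int) = r := by omega
    rw [this]
    by_cases h1 : c' = c
    · rw [if_pos h1, if_pos ⟨rfl, h1⟩]
    · rw [if_neg h1, if_neg (by tauto)]
  · rw [if_neg hir]
    refine List.map_congr_left ?_
    intro c' _
    rw [if_neg (by intro hh; exact hir (by omega))]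

theorem pvWritesFold (m n h : Int) (L : List (Int × Int)) :
    ∀ (f : Int → Int → Int), (∀ p ∈ L, 0 ≤ p.1 ∧ p.1 < m ∧ 0 ≤ p.2 ∧ p.2 < n) →
      L.foldl (fun g p => pvSet2 g p.1 p.2 h) (pvGridOf m n f)
        = pvGridOf m n (fun r c => if (r, c) ∈ L then h else f r c) := by
  induction L with
  | nil => intro f _; simp
  | cons p L ih =>
    intro f hb
    have hp := hb p (by simp)
    simp only [List.foldl_cons]
    rw [pvSet2_gridOf m n f p.1 p.2 h hp.1 hp.2.1 hp.2.2.1 hp.2.2.2,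
        ih _ (fun q hq => hb q (by simp [hq]))]
    refine pvGridOf_congr m n _ _ ?_
    intro r c _ _ _ _
    by_cases h1 : (r, c) ∈ L
    · rw [if_pos h1, if_pos (by simp [h1])]
    · rw [if_neg h1]
      by_cases h2 : r = p.1 ∧ c = p.2
      · rw [if_pos h2, if_pos (by simp [h2.1, h2.2])]
      · rw [if_neg h2, if_neg (by simp [Prod.ext_iff, h1]; tauto)]

theorem pvInnerA_fold_fst (m n r c : Int) (ds : List (Int × Int)) :
    ∀ st, (ds.foldl (pvInnerA m n r c) st).1 = st.1 := by
  induction ds with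
  | nil => intro st; rfl
  | cons d ds ih =>
    intro st
    simp only [List.foldl_cons]
    rw [ih]
    unfold pvInnerA
    dsimp only
    split <;> rfl

theorem pvLevelA_fst (m n h : Int) (curr : List (Int × Int)) :
    ∀ st, (curr.foldl (pvStepA m n h) st).1
      = curr.foldl (fun g p => pvSet2 g p.1 p.2 h) st.1 := by
  induction curr with
  | nil => intro st; rfl
  | cons cell curr ih =>
    intro st
    simp only [List.foldl_cons]
    rw [ih]
    congr 1
    unfold pvStepA
    exact pvInnerA_fold_fst m n cell.1 cell.2 pvDirections _

theorem pvNbrFold_memchar (m n r c : Int) (ds : List (Int × Int)) :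
    ∀ (vis : List (Int × Int)) (q : Int × Int),
      q ∈ (ds.foldl (pvNbrStep m n r c) (vis, [])).1 ↔
        q ∈ vis ∨ ((∃ d ∈ ds, q = (r + d.1, c + d.2)) ∧
          (0 ≤ q.1 ∧ q.1 < m ∧ 0 ≤ q.2 ∧ q.2 < n)) := by
  induction ds with
  | nil => intro vis q; simp
  | cons d ds ih =>
    intro vis q
    simp only [List.foldl_cons, pvNbrStep]
    by_cases hC : ¬ (PySem.Set.contains vis (r + d.1, c + d.2)) = true ∧
        0 ≤ r + d.1 ∧ r + d.1 < m ∧ 0 ≤ c + d.2 ∧ c + d.2 < n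
    · simp only [if_pos hC, List.nil_append]
      have hA := congrArg Prod.fst
        (pvNbrFold_char m n r c ds (vis ++ [(r + d.1, c + d.2)]) [(r + d.1, c + d.2)])
      have hB := congrArg Prod.fst
        (pvNbrFold_char m n r c ds (vis ++ [(r + d.1, c + d.2)]) [])
      dsimp only at hA hB
      rw [hA, ← hB, ih (vis ++ [(r + d.1, c + d.2)]) q]
      constructor
      · rintro (hv | hrest)
        · rcases List.mem_append.mp hv with hv | hv
          · exact Or.inl hv
          · refine Or.inr ⟨⟨d, by simp, List.mem_singleton.mp hv⟩, ?_⟩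
            rw [List.mem_singleton.mp hv]
            exact hC.2
        · exact Or.inr ⟨⟨hrest.1.choose, by simp [hrest.1.choose_spec.1], hrest.1.choose_spec.2⟩, hrest.2⟩
      · rintro (hv | ⟨⟨d', hd', hq⟩, hb⟩)
        · exact Or.inl (List.mem_append.mpr (Or.inl hv))
        · rcases List.mem_cons.mp hd' with rfl | hd''
          · exact Or.inl (List.mem_append.mpr (Or.inr (by simp [hq])))
          · exact Or.inr ⟨⟨d', hd'', hq⟩, hb⟩
    · simp only [if_neg hC]
      rw [ih vis q]
      constructor
      · rintro (hv | hrest)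
        · exact Or.inl hv
        · exact Or.inr ⟨⟨hrest.1.choose, by simp [hrest.1.choose_spec.1], hrest.1.choose_spec.2⟩, hrest.2⟩
      · rintro (hv | ⟨⟨d', hd', hq⟩, hb⟩)
        · exact Or.inl hv
        · rcases List.mem_cons.mp hd' with rfl | hd''
          · -- the direction d itself: its target is in bounds (q = it), so vis must contain it
            left
            have hqb : (PySem.Set.contains vis (r + d'.1, c + d'.2)) = true := by
              by_contra hcon
              exact hC ⟨by simpa using hcon, by rw [hq] at hb; simpa using hb⟩
            have : q ∈ vis := by
              have := List.contains_iff_mem.mp hqb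
              rwa [hq]
            exact this
          · exact Or.inr ⟨⟨d', hd'', hq⟩, hb⟩

theorem pvLevelA_vis_mem (m n h : Int) (curr : List (Int × Int)) :
    ∀ (cells : List (List Int)) (vis nxt : List (Int × Int)),
      (∀ x ∈ nxt, x ∈ vis) → ∀ q,
      (q ∈ (curr.foldl (pvStepA m n h) (cells, vis, nxt)).2.1 ↔
        q ∈ vis ∨ ∃ p ∈ curr, pvAdj p q ∧ (0 ≤ q.1 ∧ q.1 < m ∧ 0 ≤ q.2 ∧ q.2 < n)) := by
  induction curr with
  | nil => intro cells vis nxt _ q; simp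
  | cons cell curr ih =>
    intro cells vis nxt hsub q
    simp only [List.foldl_cons]
    have hstep : pvStepA m n h (cells, vis, nxt) cell
        = (pvSet2 cells cell.1 cell.2 h,
           vis ++ (pvDirections.foldl (pvNbrStep m n cell.1 cell.2) (vis, [])).2,
           nxt ++ (pvDirections.foldl (pvNbrStep m n cell.1 cell.2) (vis, [])).2) := by
      rw [pvStepA, pvFoldA_char m n cell.1 cell.2 pvDirections _ vis nxt hsub]
    rw [hstep]
    rw [ih _ _ _ (by
      intro x hx
      rcases List.mem_append.mp hx with h' | h'
      · exact List.mem_append.mpr (Or.inl (hsub _ h'))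
      · exact List.mem_append.mpr (Or.inr h')) q]
    have hmem : q ∈ vis ++ (pvDirections.foldl (pvNbrStep m n cell.1 cell.2) (vis, [])).2 ↔
        q ∈ vis ∨ (pvAdj cell q ∧ (0 ≤ q.1 ∧ q.1 < m ∧ 0 ≤ q.2 ∧ q.2 < n)) := by
      have hB := congrArg Prod.fst (pvNbrFold_char m n cell.1 cell.2 pvDirections vis [])
      dsimp only at hB
      rw [← hB]
      exact pvNbrFold_memchar m n cell.1 cell.2 pvDirections vis q
    rw [hmem]
    simp only [List.mem_cons]
    constructor
    · rintro ((hv | hadj) | ⟨p, hp, hrest⟩)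
      · exact Or.inl hv
      · exact Or.inr ⟨cell, Or.inl rfl, hadj.1, hadj.2⟩
      · exact Or.inr ⟨p, Or.inr hp, hrest⟩
    · rintro (hv | ⟨p, hp | hp, hrest⟩)
      · exact Or.inl (Or.inl hv)
      · exact Or.inl (Or.inr ⟨hp ▸ hrest.1, hrest.2⟩)
      · exact Or.inr ⟨p, hp, hrest⟩

-- the BFS loop computes the nearest-water Manhattan distance
theorem pvLoopA_minM (m n : Int) (W : List (Int × Int)) (hW : W ≠ [])
    (hWg : ∀ w ∈ W, 0 ≤ w.1 ∧ w.1 < m ∧ 0 ≤ w.2 ∧ w.2 < n) (k : Nat) :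
    ∀ (vis curr : List (Int × Int)) (h : Int), 0 ≤ h →
      (∀ p, p ∈ vis ↔ (0 ≤ p.1 ∧ p.1 < m ∧ 0 ≤ p.2 ∧ p.2 < n) ∧ pvMinM W p.1 p.2 ≤ h) →
      (∀ p, p ∈ curr ↔ (0 ≤ p.1 ∧ p.1 < m ∧ 0 ≤ p.2 ∧ p.2 < n) ∧ pvMinM W p.1 p.2 = h) →
      pvFree m n vis + curr.length < k →
      pvLoopA k m n (pvGridOf m n (fun r c => if pvMinM W r c < h then pvMinM W r c else 0))
          vis curr h
        = pvGridOf m n (fun r c => pvMinM W r c) := by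
  induction k with
  | zero =>
    intro vis curr h h0 hvis hcurr hk
    omega
  | succ k ih =>
    intro vis curr h h0 hvis hcurr hk
    by_cases hc : curr = []
    · subst hc
      rw [pvLoopA, if_pos rfl]
      refine pvGridOf_congr m n _ _ ?_
      intro r c hr hr' hc0 hc0'
      have hlt : pvMinM W r c < h := by
        by_contra hge
        rw [not_lt] at hge
        obtain ⟨q, hqb, hqv⟩ := pvChain m n W hW hWg h h0 ((pvMinM W r c - h).toNat) (r, c)
          (by exact ⟨hr, hr', hc0, hc0'⟩) (by simp; omega)
        have : q ∈ ([] : List (Int × Int)) := (hcurr q).mpr ⟨hqb, hqv⟩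
        cases this
      rw [if_pos hlt]
    · obtain ⟨C, M, heq, hndM, hfreshM⟩ := pvLevelA_char m n h curr
        (pvGridOf m n (fun r c => if pvMinM W r c < h then pvMinM W r c else 0)) vis
        PySem.Set.empty (by intro x hx; cases hx)
      have hfst := pvLevelA_fst m n h curr
        (pvGridOf m n (fun r c => if pvMinM W r c < h then pvMinM W r c else 0), vis,
          PySem.Set.empty)
      have hvm := pvLevelA_vis_mem m n h curr
        (pvGridOf m n (fun r c => if pvMinM W r c < h then pvMinM W r c else 0)) vis
        PySem.Set.empty (by intro x hx; cases hx)
      simp only [PySem.Set.empty, List.nil_append] at heq hfst hvm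
      have hCval : C = pvGridOf m n
          (fun r c => if pvMinM W r c < h + 1 then pvMinM W r c else 0) := by
      -- C is the writes fold over curr starting from the partial grid
        have h1 : C = curr.foldl (fun g p => pvSet2 g p.1 p.2 h)
            (pvGridOf m n (fun r c => if pvMinM W r c < h then pvMinM W r c else 0)) := by
          rw [← hfst, heq]
        rw [h1, pvWritesFold m n h curr _ (fun p hp => ((hcurr p).mp hp).1)]
        refine pvGridOf_congr m n _ _ ?_
        intro r c hr hr' hc0 hc0'
        by_cases h2 : (r, c) ∈ curr
        · rw [if_pos h2]
          have := ((hcurr (r, c)).mp h2).2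
          simp only at this
          rw [if_pos (by omega), this]
        · rw [if_neg h2]
          have hne : pvMinM W r c ≠ h := by
            intro hhe
            exact h2 ((hcurr (r, c)).mpr ⟨⟨hr, hr', hc0, hc0'⟩, hhe⟩)
          by_cases h3 : pvMinM W r c < h
          · rw [if_pos h3, if_pos (by omega)]
          · rw [if_neg h3, if_neg (by omega)]
      have hvm' : ∀ q, q ∈ vis ++ M ↔
          q ∈ vis ∨ ∃ p ∈ curr, pvAdj p q ∧ (0 ≤ q.1 ∧ q.1 < m ∧ 0 ≤ q.2 ∧ q.2 < n) := by
        intro q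
        have := hvm q
        rw [heq] at this
        exact this
      have hvis' : ∀ p, p ∈ vis ++ M ↔
          (0 ≤ p.1 ∧ p.1 < m ∧ 0 ≤ p.2 ∧ p.2 < n) ∧ pvMinM W p.1 p.2 ≤ h + 1 := by
        intro p
        rw [hvm' p]
        constructor
        · rintro (hv | ⟨q0, hq0, hadj, hb⟩)
          · have := (hvis p).mp hv
            exact ⟨this.1, by omega⟩
          · have hq0v := ((hcurr q0).mp hq0).2
            have := pvMinM_lip W hW hadj
            exact ⟨hb, by omega⟩
        · rintro ⟨hb, hle⟩
          by_cases hle2 : pvMinM W p.1 p.2 ≤ h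
          · exact Or.inl ((hvis p).mpr ⟨hb, hle2⟩)
          · obtain ⟨q, hadj, hqb, hqv⟩ := pvMinM_descent m n W hW hWg p hb (by omega)
            refine Or.inr ⟨q, (hcurr q).mpr ⟨hqb, by omega⟩, pvAdj_symm hadj, hb⟩
      have hcurr' : ∀ p, p ∈ M ↔
          (0 ≤ p.1 ∧ p.1 < m ∧ 0 ≤ p.2 ∧ p.2 < n) ∧ pvMinM W p.1 p.2 = h + 1 := by
        intro p
        constructor
        · intro hpM
          have h1 := (hvis' p).mp (List.mem_append.mpr (Or.inr hpM))
          have h2 := (hfreshM p hpM).1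
          have h3 : ¬ pvMinM W p.1 p.2 ≤ h := by
            intro hle
            exact h2 ((hvis p).mpr ⟨h1.1, hle⟩)
          exact ⟨h1.1, by omega⟩
        · rintro ⟨hb, he⟩
          have h1 : p ∈ vis ++ M := (hvis' p).mpr ⟨hb, by omega⟩
          rcases List.mem_append.mp h1 with h2 | h2
          · exact absurd ((hvis p).mp h2).2 (by omega)
          · exact h2
      have hfree := pvFree_append m n M vis hndM hfreshM
      have hlen : 0 < curr.length := List.length_pos_of_ne_nil hc
      rw [pvLoopA, if_neg hc]
      simp only [PySem.Set.empty]
      rw [heq]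
      dsimp only
      rw [hCval]
      exact ih (vis ++ M) M (h + 1) (by omega) hvis' hcurr'
        (by omega)

-- a nested for-row/for-col loop is a single fold over the cell list
theorem pvNestedFold {β : Type} (φ : β → (Int × Int) → β) (m n : Int) (b : β) :
    (PySem.List.pyRange 0 m 1).foldl
        (fun b r => (PySem.List.pyRange 0 n 1).foldl (fun b c => φ b (r, c)) b) b
      = (pvGridCells m n).foldl φ b := by
  rw [pvGridCells, List.foldl_flatMap]
  simp [List.foldl_map]

def pvCellA (isWater : List (List Int))
    (cv : PySem.Set (Int × Int) × PySem.Set (Int × Int)) (p : Int × Int) :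
    PySem.Set (Int × Int) × PySem.Set (Int × Int) :=
  if pvGet2 isWater p.1 p.2 == 1 then (PySem.Set.add cv.1 p, PySem.Set.add cv.2 p) else cv

theorem pvInitA_eq (isWater : List (List Int)) (m n : Int) :
    pvInitA isWater m n
      = (pvGridCells m n).foldl (pvCellA isWater) (PySem.Set.empty, PySem.Set.empty) := by
  rw [pvInitA, ← pvNestedFold (pvCellA isWater) m n]
  rfl

theorem pvInitFold_filter (isWater : List (List Int)) :
    ∀ (L S : List (Int × Int)), L.Nodup → (∀ p ∈ L, p ∉ S) →
      L.foldl (pvCellA isWater) (S, S)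
        = (S ++ L.filter (fun p => pvGet2 isWater p.1 p.2 == 1),
           S ++ L.filter (fun p => pvGet2 isWater p.1 p.2 == 1)) := by
  intro L
  induction L with
  | nil => intro S _ _; simp
  | cons p L ih =>
    intro S hnd hfresh
    simp only [List.nodup_cons] at hnd
    have hpS : p ∉ S := hfresh p (by simp)
    simp only [List.foldl_cons, pvCellA, List.filter_cons]
    by_cases hw : pvGet2 isWater p.1 p.2 == 1
    · simp only [hw, ite_true]
      have hadd : PySem.Set.add S p = S ++ [p] := by
        simp [PySem.Set.add, PySem.Set.contains, hpS]
      rw [hadd, ih (S ++ [p]) hnd.2 (by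
        intro q hq hq'
        rcases List.mem_append.mp hq' with h' | h'
        · exact hfresh q (by simp [hq]) h'
        · exact hnd.1 ((List.mem_singleton.mp h') ▸ hq))]
      simp
    · simp only [hw, Bool.false_eq_true, ite_false]
      exact ih S hnd.2 (fun q hq => hfresh q (by simp [hq]))

theorem pvWaters_eq (isWater : List (List Int)) (m n : Int) :
    pvWaters isWater m n
      = (pvGridCells m n).filter (fun p => pvGet2 isWater p.1 p.2 == 1) := by
  rw [pvWaters,
      pvNestedFold (fun acc p => if pvGet2 isWater p.1 p.2 == 1 then acc ++ [p] else acc) m n [],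
      PySem.List.foldl_append_if_eq_filter]
  simp

-- ===== VERDICT (by name: the statement is the Claim_ definition above) =====
theorem highestPeak_spec : Claim_equal_highestPeak := by
  intro isWater _ _
  unfold Spec_highestPeak highestPeak highestPeak_alt
  dsimp only
  rw [pvWaters_eq, pvInitA_eq]
  have hinit := pvInitFold_filter isWater
    (pvGridCells (isWater.length : Int) (((isWater.headD []).length : Int))) []
    (pvNodup_gridCells _ _) (by simp)
  simp only [List.nil_append] at hinit
  simp only [PySem.Set.empty]
  rw [hinit]
  dsimp only
  by_cases hS : (pvGridCells (isWater.length : Int) (((isWater.headD []).length : Int))).filter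
      (fun p => pvGet2 isWater p.1 p.2 == 1) = []
  · rw [hS, pvLoopA, if_pos rfl]
    simp only [List.map_nil]
    refine List.map_congr_left ?_
    intro r _
    simp only [PySem.List.minD, PySem.List.min?, Option.getD]
    rw [List.map_const']
    simp [PySem.List.length_pyRange_one]
  · set W := (pvGridCells (isWater.length : Int) (((isWater.headD []).length : Int))).filter
      (fun p => pvGet2 isWater p.1 p.2 == 1) with hWdef
    have hWg : ∀ w ∈ W, 0 ≤ w.1 ∧ w.1 < (isWater.length : Int) ∧
        0 ≤ w.2 ∧ w.2 < (((isWater.headD []).length : Int)) := by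
      intro w hw
      exact (pvMem_gridCells _ _ w).mp (List.mem_of_mem_filter hw)
    have hvis0 : ∀ p, p ∈ W ↔ (0 ≤ p.1 ∧ p.1 < (isWater.length : Int) ∧
        0 ≤ p.2 ∧ p.2 < (((isWater.headD []).length : Int))) ∧ pvMinM W p.1 p.2 ≤ 0 := by
      intro p
      constructor
      · intro hp
        refine ⟨hWg p hp, le_of_eq ?_⟩
        exact (pvMinM_zero_iff W hS p.1 p.2).mpr (by simpa using hp)
      · rintro ⟨hb, hle⟩
        have h0 := pvMinM_nonneg W hS p.1 p.2
        have := (pvMinM_zero_iff W hS p.1 p.2).mp (by omega)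
        simpa using this
    have hcurr0 : ∀ p, p ∈ W ↔ (0 ≤ p.1 ∧ p.1 < (isWater.length : Int) ∧
        0 ≤ p.2 ∧ p.2 < (((isWater.headD []).length : Int))) ∧ pvMinM W p.1 p.2 = 0 := by
      intro p
      constructor
      · intro hp
        exact ⟨hWg p hp, (pvMinM_zero_iff W hS p.1 p.2).mpr (by simpa using hp)⟩
      · rintro ⟨hb, he⟩
        have := (pvMinM_zero_iff W hS p.1 p.2).mp he
        simpa using this
    have hcells0 : (PySem.List.pyRange 0 (isWater.length : Int) 1).map
          (fun _ => List.replicate (((isWater.headD []).length : Int)).toNat (0 : Int))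
        = pvGridOf (isWater.length : Int) (((isWater.headD []).length : Int))
            (fun r c => if pvMinM W r c < 0 then pvMinM W r c else 0) := by
      have h1 : (PySem.List.pyRange 0 (isWater.length : Int) 1).map
            (fun _ => List.replicate (((isWater.headD []).length : Int)).toNat (0 : Int))
          = pvGridOf (isWater.length : Int) (((isWater.headD []).length : Int))
              (fun _ _ => (0 : Int)) := by
        refine List.map_congr_left ?_
        intro r _
        rw [List.map_const']
        simp [PySem.List.length_pyRange_one]
      rw [h1]
      refine pvGridOf_congr _ _ _ _ ?_
      intro r c _ _ _ _
      have := pvMinM_nonneg W hS r c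
      rw [if_neg (by omega)]
    rw [hcells0]
    have hB : (PySem.List.pyRange 0 (isWater.length : Int) 1).map
          (fun r => (PySem.List.pyRange 0 (((isWater.headD []).length : Int)) 1).map
            (fun c => PySem.List.minD (W.map (fun w => |r - w.1| + |c - w.2|)) (fun x => x) 0))
        = pvGridOf (isWater.length : Int) (((isWater.headD []).length : Int))
            (fun r c => pvMinM W r c) := rfl
    rw [hB]
    have hfuel : pvFree (isWater.length : Int) (((isWater.headD []).length : Int)) W + W.length
        < (pvGridCells (isWater.length : Int) (((isWater.headD []).length : Int))).length * 2 + 1 := by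
      have h1 : pvFree (isWater.length : Int) (((isWater.headD []).length : Int)) W
          ≤ (pvGridCells (isWater.length : Int) (((isWater.headD []).length : Int))).length :=
        List.length_filter_le _ _
      have h2 : W.length
          ≤ (pvGridCells (isWater.length : Int) (((isWater.headD []).length : Int))).length := by
        rw [hWdef]
        exact List.length_filter_le _ _
      omega
    exact pvLoopA_minM (isWater.length : Int) (((isWater.headD []).length : Int)) W hS hWg
      ((pvGridCells (isWater.length : Int) (((isWater.headD []).length : Int))).length * 2 + 1)
      W W 0 le_rfl hvis0 hcurr0 hfuel
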